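-- pv_equiv track=rewrite | github.com/yakimka/advent_of_code_2024 | day11/part1.py | blink
-- ===== SOURCE A (Python) =====
-- def blink(stones: list[str]) -> list[str]:
--     if len(stones) == 1:
--         stone = stones[0]
--         if stone == "0":
--             return ["1"]
--         stone_len = len(stone)
--         if stone_len % 2 == 0:
--             middle = stone_len // 2
--             first_half = stone[:middle]
--             second_half = stone[middle:]
--             if second_half.startswith("0"):
--                 second_half = second_half.lstrip("0") or "0"
--             return [first_half, second_half]
--         return [str(int(stone) * 2024)]
--     else:
--         results = []
--         for stone in stones:
--             results.extend(blink([stone]))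
--         return results
-- ===== SOURCE B (Python) =====
-- def blink(stones: list[str]) -> list[str]:
--     # Pass 1: memoize the transform of each DISTINCT stone in a dict.
--     cache = {}
--     for stone in stones:
--         if stone not in cache:
--             if stone == "0":
--                 res = ["1"]
--             elif len(stone) % 2 == 0:
--                 mid = len(stone) // 2
--                 second = stone[mid:]
--                 if second.startswith("0"):
--                     second = second.lstrip("0") or "0"
--                 res = [stone[:mid], second]
--             else:
--                 res = [str(int(stone) * 2024)]
--             cache[stone] = res
--     # Pass 2: emit the cached result for every stone, in order.
--     out = []
--     for stone in stones:
--         out += cache[stone]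
--     return out
-- ===== Notes on version B (the rewrite author's own statement) =====
-- stated objective: alternative
-- what changed: Replaces A's self-recursive dispatch (re-calling blink([stone]) per element) with a two-pass memoized design: a dict mapping each DISTINCT stone to its transform is built once, then a second pass emits cached results, so duplicate stones are transformed only once.
import Mathlib
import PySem

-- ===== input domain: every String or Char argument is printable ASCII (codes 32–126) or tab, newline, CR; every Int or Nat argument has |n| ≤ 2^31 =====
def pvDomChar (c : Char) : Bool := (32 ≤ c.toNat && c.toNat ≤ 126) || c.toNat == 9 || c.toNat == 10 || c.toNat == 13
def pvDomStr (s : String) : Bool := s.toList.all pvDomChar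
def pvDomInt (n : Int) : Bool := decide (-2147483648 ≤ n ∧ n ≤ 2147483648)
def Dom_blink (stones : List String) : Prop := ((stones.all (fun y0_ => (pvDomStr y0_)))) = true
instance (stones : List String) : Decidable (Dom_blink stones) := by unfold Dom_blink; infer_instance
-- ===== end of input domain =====

-- B replaces A's self-recursive per-element dispatch by a two-pass memoized design: one pass
-- builds a dict from each distinct stone to its transform, a second pass emits cached results.
-- Objective: alternative (transform computed once per distinct stone).

-- ===== PORT A =====
def blink (stones : List String) : List String :=
  if _h : stones.length = 1 then
    match PySem.List.pyGet? stones 0 with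
    | none => []   -- unreachable: the list has length 1
    | some stone =>
      if stone = "0" then ["1"]
      else
        let stoneLen := PySem.Str.len stone
        if stoneLen % 2 = 0 then
          let middle := PySem.Int.floordiv stoneLen 2
          let firstHalf := PySem.Str.slice stone none (some (middle : Int))
          let secondHalf := PySem.Str.slice stone (some (middle : Int)) none
          let secondHalf :=
            if PySem.Str.startswith secondHalf "0" then
              -- hand port of secondHalf.lstrip("0") (drop leading '0's) — exact;
              -- `or "0"` is the emptiness check
              let t := String.ofList (secondHalf.toList.dropWhile (fun c => c == '0'))
              if t = "" then "0" else t
            else secondHalf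
          [firstHalf, secondHalf]
        else
          match PySem.Int.ofStr? stone with
          | some n => [PySem.Int.toStr (n * 2024)]
          | none => []   -- Python raises ValueError here; excluded by Pre_blink
  else
    stones.attach.foldl (fun results st => results ++ blink [st.1]) []
termination_by stones.length
decreasing_by
  have h1 : 0 < stones.length := List.length_pos_of_mem st.2
  simp only [List.length_singleton]
  omega

-- ===== PORT B =====
-- the body of B's cache-building loop: the value `res` computed for a stone not yet cached
def pvRes (stone : String) : List String :=
  if stone = "0" then ["1"]
  else if stone.toList.length % 2 = 0 then
    let mid := stone.toList.length / 2   -- Python // on nonnegative ints: exact as Nat division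
    let second := stone.toList.drop mid  -- stone[mid:], exact for 0 ≤ mid ≤ len
    let second :=
      if second.head? = some '0' then    -- second.startswith("0")
        let t := second.dropWhile (fun c => c == '0')   -- second.lstrip("0"), exact
        if t = [] then ['0'] else t      -- … or "0"
      else second
    [String.ofList (stone.toList.take mid), String.ofList second]   -- stone[:mid], exact
  else
    match PySem.Int.ofStr? stone with
    | some n => [PySem.Int.toStr (n * 2024)]
    | none => []   -- Python raises ValueError here; excluded by Pre_blink

def blink_alt (stones : List String) : List String :=
  -- pass 1: cache = {} ; for stone in stones: if stone not in cache: cache[stone] = res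
  let cache : PySem.Dict String (List String) :=
    stones.foldl (fun d s => if d.contains s then d else d.insert s (pvRes s)) PySem.Dict.empty
  -- pass 2: out = [] ; for stone in stones: out += cache[stone]
  stones.foldl (fun out s =>
    out ++ (match cache.get? s with
            | some r => r
            | none => []))   -- KeyError: unreachable, every stone was cached in pass 1
    []

-- ===== PRECONDITION & SPEC =====
-- Pre_ excludes exactly the inputs on which Python A raises ValueError: a stone other than
-- "0" of odd length that int() cannot parse.
def Pre_blink (stones : List String) : Prop :=
  (stones.all (fun s => s == "0" || PySem.Str.len s % 2 == 0 || (PySem.Int.ofStr? s).isSome)) = true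
instance (stones : List String) : Decidable (Pre_blink stones) := by unfold Pre_blink; infer_instance
def pvWitness_blink : List String := ["0", "2024", "17"]

def Spec_blink (stones : List String) (out : List String) : Prop := out = blink_alt stones
instance (stones : List String) (out : List String) : Decidable (Spec_blink stones out) := by unfold Spec_blink; infer_instance

-- ===== CLAIM (what is proved, stated in full; the proofs are below) =====
def Claim_equal_blink : Prop := ∀ (stones : List String), Dom_blink stones → Pre_blink stones → Spec_blink stones (blink stones)

-- ===== LEMMAS AND PROOFS =====

-- abbreviation used only by the proofs: B's cache-building step
def pvStep (d : PySem.Dict String (List String)) (s : String) : PySem.Dict String (List String) :=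
  if d.contains s then d else d.insert s (pvRes s)

theorem pvCache_sound (l : List String) (d : PySem.Dict String (List String))
    (hd : ∀ k, d.get? k = none ∨ d.get? k = some (pvRes k)) :
    ∀ k, (l.foldl pvStep d).get? k = none ∨ (l.foldl pvStep d).get? k = some (pvRes k) := by
  induction l generalizing d with
  | nil => exact hd
  | cons a l ih =>
    refine ih _ ?_
    intro k
    unfold pvStep
    split
    · exact hd k
    · rw [PySem.Dict.get?_insert]
      by_cases hk : k = a
      · subst hk; simp
      · rw [if_neg hk]; exact hd k

theorem pvCache_pres (l : List String) (d : PySem.Dict String (List String)) (k : String)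
    (h : ((d.get? k).isSome : Prop)) : (((l.foldl pvStep d).get? k).isSome : Prop) := by
  induction l generalizing d with
  | nil => exact h
  | cons a l ih =>
    refine ih _ ?_
    unfold pvStep
    split
    · exact h
    · rw [PySem.Dict.get?_insert]
      by_cases hk : k = a
      · simp [hk]
      · rw [if_neg hk]; exact h

theorem pvCache_mem (l : List String) (d : PySem.Dict String (List String)) (s : String)
    (hs : s ∈ l) : (((l.foldl pvStep d).get? s).isSome : Prop) := by
  induction l generalizing d with
  | nil => cases hs
  | cons a l ih =>
    rcases List.mem_cons.mp hs with rfl | hs'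
    · refine pvCache_pres l (pvStep d s) s ?_
      unfold pvStep
      split
      · rename_i hc
        rw [PySem.Dict.contains_eq_isSome_get?] at hc
        exact (Option.isSome_iff_exists.mp hc).elim (fun v hv => by simp [hv])
      · rw [PySem.Dict.get?_insert_self]; simp
    · exact ih _ hs'

theorem pvCache_get (stones : List String) (s : String) (hs : s ∈ stones) :
    (stones.foldl pvStep PySem.Dict.empty).get? s = some (pvRes s) := by
  have hsound := pvCache_sound stones PySem.Dict.empty
    (by intro k; left; exact PySem.Dict.get?_empty k) s
  have hmem := pvCache_mem stones PySem.Dict.empty s hs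
  rcases hsound with h | h
  · rw [h] at hmem; simp at hmem
  · exact h

theorem pvOfList_inj {cs ds : List Char} : String.ofList cs = String.ofList ds ↔ cs = ds := by
  constructor
  · intro h; have := congrArg String.toList h; simpa using this
  · intro h; rw [h]

theorem pvStartswith0 (t : String) : PySem.Str.startswith t "0" = (t.toList.head? == some '0') := by
  rw [PySem.Str.startswith_eq]
  generalize t.toList = cs
  cases cs with
  | nil => simp [PySem.Chars.startswith]
  | cons c cs => simp [PySem.Chars.startswith, List.isPrefixOf, eq_comm]

theorem pvSliceTake (s : String) (m : Nat) :
    PySem.Str.slice s none (some (m : Int)) = String.ofList (s.toList.take m) := by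
  simp [PySem.Str.slice, PySem.List.slice_to_natCast]

theorem pvSliceDrop (s : String) (m : Nat) :
    PySem.Str.slice s (some (m : Int)) none = String.ofList (s.toList.drop m) := by
  simp [PySem.Str.slice, PySem.List.slice_from_natCast]

theorem blink_single (s : String) : blink [s] = pvRes s := by
  have hget : PySem.List.pyGet? [s] 0 = some s := by
    simp [PySem.List.pyGet?, PySem.List.pyIdx?]
  rw [blink, dif_pos (show ([s] : List String).length = 1 from rfl), hget]
  change (if s = "0" then _ else _) = _
  unfold pvRes
  by_cases h0 : s = "0"
  · simp [h0]
  · rw [if_neg h0, if_neg h0]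
    have hlen : PySem.Str.len s = (s.toList.length : Int) := by simp [PySem.Str.len_eq]
    by_cases he : s.toList.length % 2 = 0
    · -- even length: both take the split branch
      have hA : PySem.Str.len s % 2 = 0 := by rw [hlen]; omega
      rw [if_pos hA, if_pos he]
      have hmid : PySem.Int.floordiv (PySem.Str.len s) 2 = ((s.toList.length / 2 : Nat) : Int) := by
        rw [hlen]; exact_mod_cast PySem.Int.floordiv_natCast s.toList.length 2
      have hempty : ∀ cs : List Char, (String.ofList cs = "") ↔ cs = [] := by
        intro cs; rw [show ("" : String) = String.ofList [] from rfl, pvOfList_inj]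
      have hzero : ("0" : String) = String.ofList ['0'] := rfl
      simp only [hmid, pvSliceTake, pvSliceDrop, pvStartswith0, String.toList_ofList, beq_iff_eq]
      by_cases hz : (s.toList.drop (s.toList.length / 2)).head? = some '0'
      · rw [if_pos hz, if_pos hz]
        by_cases ht : (s.toList.drop (s.toList.length / 2)).dropWhile (fun c => c == '0') = []
        · rw [if_pos ((hempty _).mpr ht), if_pos ht, hzero]
        · rw [if_neg (fun hc => ht ((hempty _).mp hc)), if_neg ht]
      · rw [if_neg hz, if_neg hz]
    · -- odd length: both take the int() branch
      have hA : ¬ PySem.Str.len s % 2 = 0 := by rw [hlen]; omega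
      rw [if_neg hA, if_neg he]

theorem blink_alt_eq_flatMap (stones : List String) :
    blink_alt stones = stones.flatMap pvRes := by
  show (stones.foldl (fun out s =>
      out ++ (match (stones.foldl pvStep PySem.Dict.empty).get? s with
              | some r => r
              | none => [])) []) = _
  rw [PySem.List.foldl_congr_mem stones _ (fun out s => out ++ pvRes s) []
    (by intro acc x hx; rw [pvCache_get stones x hx])]
  rw [PySem.List.foldl_append_eq_flatMap]
  simp

-- ===== VERDICT (by name: the statement is the Claim_ definition above) =====
theorem blink_spec : Claim_equal_blink := by
  intro stones _ _
  unfold Spec_blink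
  rw [blink_alt_eq_flatMap]
  by_cases h : stones.length = 1
  · obtain ⟨s, rfl⟩ := List.length_eq_one_iff.mp h
    simp [blink_single]
  · rw [blink, dif_neg h]
    rw [List.foldl_attach (l := stones) (f := fun r st => r ++ blink [st]) (b := [])]
    rw [PySem.List.foldl_append_eq_flatMap]
    simp [blink_single]
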